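-- pv_equiv track=rewrite | github.com/forqk/Py_ | 1.Basics/LotteryPartTwo/solution.py | gen_series
-- ===== SOURCE A (Python) =====
-- def gen_series(series):
--     """
--     генератор серий лотерейных билетов начиная с series по "ZZ" включительно, входные
--     параметры: series -  - номер серии, выход - строка, состоящая из двух заглавных
--     букв латинского алфавита
--     """
--     # напишите вашу реализацию здесь
--     first = series[0].upper()
--     last = series[1].upper()
--
--     yield str(first + last)
--
--     while True:
--         if first == 'Z' and last == 'Z':
--             break
--         if last == 'Z':
--             last = 'A'
--             first = chr(ord(first) + 1)
--         else :
--             last = chr(ord(last)+ 1)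
--
--         yield str(first + last)
-- ===== SOURCE B (Python) =====
-- def gen_series(series):
--     """
--     генератор серий лотерейных билетов начиная с series по "ZZ" включительно
--     (flat decomposition: one row for the fixed first letter, then full rows)
--     """
--     first = series[0].upper()
--     last = series[1].upper()
--     for c in range(ord(last), 91):
--         yield first + chr(c)
--     for f in range(ord(first) + 1, 91):
--         for c in range(65, 91):
--             yield chr(f) + chr(c)
-- ===== Notes on version B (the rewrite author's own statement) =====
-- stated objective: alternative
-- what changed: Replaces the carry-propagating while-loop (increment last, wrap to 'A' and bump first on 'Z') with two flat range() loops: one row of codes from the start's second letter to 'Z' with the first letter fixed, then full A..Z rows for each later first letter, decoded with chr().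
-- outside the precondition, e.g. on gen_series('Z'): A raises IndexError, B raises IndexError
import Mathlib
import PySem

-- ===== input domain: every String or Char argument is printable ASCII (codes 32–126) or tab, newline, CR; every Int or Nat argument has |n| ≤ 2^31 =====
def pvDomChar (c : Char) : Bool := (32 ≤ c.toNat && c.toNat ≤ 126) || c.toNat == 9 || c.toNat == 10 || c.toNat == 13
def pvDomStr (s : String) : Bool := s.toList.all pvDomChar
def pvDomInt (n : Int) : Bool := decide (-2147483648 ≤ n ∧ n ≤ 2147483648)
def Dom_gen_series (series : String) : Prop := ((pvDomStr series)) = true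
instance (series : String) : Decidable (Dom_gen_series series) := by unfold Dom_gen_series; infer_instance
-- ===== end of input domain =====

-- B replaces A's carry-propagating while-loop by two flat range loops decoded with chr();
-- same cost, different decomposition. Both are generators in Python; the ports return the list of yields.

-- ===== PORT A =====
-- chr(i) for a small nonnegative code (exact for 0 ≤ i < 0xD800, which covers all codes here)
def pvChr (i : Int) : Char := Char.ofNat i.toNat

-- the while-loop of A over the two current characters; fuel only makes the recursion structural,
-- 4096 exceeds the ≤ 2430 iterations possible from any state admitted by Pre_
def pvGenLoopA : Nat → Char → Char → List String
  | 0, _, _ => []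
  | fuel+1, first, last =>
    if first = 'Z' ∧ last = 'Z' then []
    else if last = 'Z' then
      -- last = 'A'; first = chr(ord(first) + 1)
      String.mk [Char.ofNat (first.toNat + 1), 'A']
        :: pvGenLoopA fuel (Char.ofNat (first.toNat + 1)) 'A'
    else
      -- last = chr(ord(last) + 1)
      String.mk [first, Char.ofNat (last.toNat + 1)]
        :: pvGenLoopA fuel first (Char.ofNat (last.toNat + 1))

def gen_series (series : String) : List String :=
  match PySem.Str.pyGet? series 0, PySem.Str.pyGet? series 1 with
  | some c0, some c1 =>
    -- series[0].upper() on a one-character string is character-wise upper (exact on ASCII)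
    let first := PySem.Chars.upperChar c0
    let last := PySem.Chars.upperChar c1
    String.mk [first, last] :: pvGenLoopA 4096 first last
  | _, _ => []   -- IndexError (len < 2): excluded by Pre_

-- ===== PORT B =====
def gen_series_alt (series : String) : List String :=
  match PySem.Str.pyGet? series 0 with
  | none => []   -- IndexError (len < 2): excluded by Pre_
  | some c0 =>
    match PySem.Str.pyGet? series 1 with
    | none => []   -- IndexError (len < 2): excluded by Pre_
    | some c1 =>
      let first := PySem.Chars.upperChar c0
      let last := PySem.Chars.upperChar c1
      (PySem.List.pyRange (last.toNat : Int) 91 1).map (fun c => String.mk [first, pvChr c])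
        ++ (PySem.List.pyRange ((first.toNat : Int) + 1) 91 1).flatMap
             (fun f => (PySem.List.pyRange 65 91 1).map (fun c => String.mk [pvChr f, pvChr c]))

-- ===== PRECONDITION & SPEC =====
-- Pre_ excludes strings of length < 2 (A raises IndexError) and strings whose first two characters
-- uppercase to a code above 'Z' ('[' .. '~'), on which A's while-loop never reaches 'Z'/'Z' and
-- the generator never terminates; A returns (a finite sequence) on every admitted input.
def Pre_gen_series (series : String) : Prop :=
  2 ≤ series.toList.length ∧
  (PySem.Chars.upperChar (series.toList.headD 'A')).toNat ≤ 90 ∧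
  (PySem.Chars.upperChar ((series.toList.drop 1).headD 'A')).toNat ≤ 90
instance (series : String) : Decidable (Pre_gen_series series) := by
  unfold Pre_gen_series; infer_instance
def pvWitness_gen_series : String := "aY"

def Spec_gen_series (series : String) (out : List String) : Prop := out = gen_series_alt series
instance (series : String) (out : List String) : Decidable (Spec_gen_series series out) := by unfold Spec_gen_series; infer_instance

-- ===== CLAIM (what is proved, stated in full; the proofs are below) =====
def Claim_equal_gen_series : Prop := ∀ (series : String), Dom_gen_series series → Pre_gen_series series → Spec_gen_series series (gen_series series)

-- ===== LEMMAS AND PROOFS =====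

theorem pv_toNat_ofNat (n : Nat) (h : n < 91) : (Char.ofNat n).toNat = n := by
  have hv : n.isValidChar := Or.inl (by omega)
  rw [Char.ofNat, dif_pos hv]
  simp [Char.toNat, Char.ofNatAux]

theorem pv_char_eq_iff (c d : Char) : c = d ↔ c.toNat = d.toNat := by
  constructor
  · intro h; rw [h]
  · intro h; exact Char.ext (UInt32.toNat_inj.mp h)

-- the tail of A's loop from state (f, l) equals the tail of B's flat ranges
theorem pvGenLoopA_eq (fuel : Nat) : ∀ (f l : Char), f.toNat ≤ 90 → l.toNat ≤ 90 →
    (90 - f.toNat) * 26 + (90 - l.toNat) ≤ fuel →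
    pvGenLoopA fuel f l =
      (PySem.List.pyRange ((l.toNat : Int) + 1) 91 1).map (fun c => String.mk [f, pvChr c])
        ++ (PySem.List.pyRange ((f.toNat : Int) + 1) 91 1).flatMap
             (fun g => (PySem.List.pyRange 65 91 1).map (fun c => String.mk [pvChr g, pvChr c])) := by
  induction fuel with
  | zero =>
    intro f l hf hl hfuel
    have hf90 : f.toNat = 90 := by omega
    have hl90 : l.toNat = 90 := by omega
    rw [pvGenLoopA,
        PySem.List.pyRange_one_eq_nil (a := ((l.toNat : Int) + 1)) (b := 91) (by omega),
        PySem.List.pyRange_one_eq_nil (a := ((f.toNat : Int) + 1)) (b := 91) (by omega)]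
    simp
  | succ fuel ih =>
    intro f l hf hl hfuel
    rw [pvGenLoopA]
    by_cases hZZ : f = 'Z' ∧ l = 'Z'
    · have hf90 : f.toNat = 90 := by rw [hZZ.1]; decide
      have hl90 : l.toNat = 90 := by rw [hZZ.2]; decide
      rw [if_pos hZZ,
          PySem.List.pyRange_one_eq_nil (a := ((l.toNat : Int) + 1)) (b := 91) (by omega),
          PySem.List.pyRange_one_eq_nil (a := ((f.toNat : Int) + 1)) (b := 91) (by omega)]
      simp
    · rw [if_neg hZZ]
      by_cases hlZ : l = 'Z'
      · have hl90 : l.toNat = 90 := by rw [hlZ]; decide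
        have hfne : f.toNat ≠ 90 := by
          intro h
          exact hZZ ⟨(pv_char_eq_iff f 'Z').mpr (by rw [h]; decide), hlZ⟩
        rw [if_pos hlZ]
        have hf' : (Char.ofNat (f.toNat + 1)).toNat = f.toNat + 1 :=
          pv_toNat_ofNat _ (by omega)
        have hA : ('A' : Char).toNat = 65 := by decide
        rw [ih (Char.ofNat (f.toNat + 1)) 'A' (by omega) (by decide)
              (by rw [hf', hA]; omega), hf', hA]
        rw [PySem.List.pyRange_one_eq_nil (a := ((l.toNat : Int) + 1)) (b := 91) (by omega)]
        rw [PySem.List.pyRange_one_cons (a := ((f.toNat : Int) + 1)) (b := 91) (by omega)]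
        simp only [List.flatMap_cons]
        rw [PySem.List.pyRange_one_cons (a := (65 : Int)) (b := 91) (by omega)]
        simp only [List.map_cons, List.cons_append]
        simp only [pvChr]
        norm_num
        exact congrArg (fun c => String.mk [Char.ofNat (f.toNat + 1), c]) (by decide)
      · have hlne : l.toNat ≠ 90 := by
          intro h
          exact hlZ ((pv_char_eq_iff l 'Z').mpr (by rw [h]; decide))
        rw [if_neg hlZ]
        have hl' : (Char.ofNat (l.toNat + 1)).toNat = l.toNat + 1 :=
          pv_toNat_ofNat _ (by omega)
        rw [ih f (Char.ofNat (l.toNat + 1)) (by omega) (by omega)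
              (by rw [hl']; omega), hl']
        rw [PySem.List.pyRange_one_cons (a := ((l.toNat : Int) + 1)) (b := 91) (by omega)]
        simp only [List.map_cons, List.cons_append]
        simp only [pvChr]
        norm_num

-- ===== VERDICT (by name: the statement is the Claim_ definition above) =====
theorem gen_series_spec : Claim_equal_gen_series := by
  intro series _hdom hpre
  obtain ⟨hlen, hup0, hup1⟩ := hpre
  match hs : series.toList with
  | [] => simp [hs] at hlen
  | [c0] => simp [hs] at hlen
  | c0 :: c1 :: rest =>
    have h0 : PySem.Str.pyGet? series 0 = some c0 := by
      simp [PySem.Str.pyGet?, hs, PySem.List.pyGet?_zero]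
    have h1 : PySem.Str.pyGet? series 1 = some c1 := by
      rw [show (1:Int) = ((1:Nat):Int) by norm_num]
      simp [PySem.Str.pyGet?, hs]
    have hc0 : (PySem.Chars.upperChar c0).toNat ≤ 90 := by rw [hs] at hup0; exact hup0
    have hc1 : (PySem.Chars.upperChar c1).toNat ≤ 90 := by rw [hs] at hup1; exact hup1
    show Spec_gen_series series (gen_series series)
    unfold Spec_gen_series gen_series gen_series_alt
    rw [h0, h1]
    simp only
    rw [pvGenLoopA_eq 4096 _ _ hc0 hc1 (by omega)]
    rw [PySem.List.pyRange_one_cons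
        (a := ((PySem.Chars.upperChar c1).toNat : Int)) (b := 91) (by omega)]
    simp only [List.map_cons, List.cons_append]
    congr 2
    simp [pvChr]
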